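-- pv_equiv track=rewrite | github.com/bobcaoge/my-code | python/leetcode/909_Snakes_and_Ladders.py | generate_reflection
-- ===== SOURCE A (Python) =====
-- def generate_reflection(row, col):
--     ret = []
--     flag = True
--     for i in range(row):
--         start = i*col+1
--         cur = [x for x in range(start, start+col)]
--         ret.insert(0, cur if flag else cur[::-1])
--         flag = not flag
--     return {ret[i][j]: (i, j) for i in range(row) for j in range(col)}
-- ===== SOURCE B (Python) =====
-- def generate_reflection(row, col):
--     result = {}
--     for i in range(row):
--         orig = row - 1 - i
--         base = orig * col + 1
--         for j in range(col):
--             value = base + j if orig % 2 == 0 else base + col - 1 - j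
--             result[value] = (i, j)
--     return result
-- ===== Notes on version B (the rewrite author's own statement) =====
-- stated objective: simpler
-- what changed: B builds no intermediate boustrophedon board at all: it computes each board number directly from the final cell position with a closed-form parity formula (orig = row-1-i, base+j or base+col-1-j), instead of A's construction of a reversed list of alternating rows followed by indexed lookups.
import Mathlib
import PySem

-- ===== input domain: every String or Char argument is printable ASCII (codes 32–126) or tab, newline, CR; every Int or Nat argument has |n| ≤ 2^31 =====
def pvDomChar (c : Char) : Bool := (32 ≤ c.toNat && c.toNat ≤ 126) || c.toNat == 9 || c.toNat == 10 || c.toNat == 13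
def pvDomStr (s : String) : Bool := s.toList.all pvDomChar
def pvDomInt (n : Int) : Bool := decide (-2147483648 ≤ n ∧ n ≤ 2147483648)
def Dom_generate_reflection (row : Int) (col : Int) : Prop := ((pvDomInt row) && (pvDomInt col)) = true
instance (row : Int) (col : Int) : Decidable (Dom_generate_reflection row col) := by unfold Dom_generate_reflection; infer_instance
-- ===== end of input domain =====

-- B replaces A's intermediate boustrophedon board and indexing by a closed-form
-- per-cell formula (objective: simpler); return values proved equal on all inputs.

-- ===== PORT A =====
-- one iteration of A's board-building loop: start = i*col+1; cur = list(range(start, start+col));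
-- ret.insert(0, cur if flag else cur[::-1]); flag = not flag
def pvStepA (col : Int) (st : List (List Int) × Bool) (i : Int) : List (List Int) × Bool :=
  let start := i * col + 1
  let cur := PySem.List.pyRange start (start + col) 1
  (PySem.List.insert st.1 0 (if st.2 then cur else (PySem.List.slice? cur none none (-1)).getD []), !st.2)

def generate_reflection (row : Int) (col : Int) : List (Int × Int × Int) :=
  let ret := ((PySem.List.pyRange 0 row 1).foldl (pvStepA col) ([], true)).1
  -- dict comprehension {ret[i][j]: (i, j) for i in range(row) for j in range(col)};
  -- ret[i][j] is always in range here, so pyGetD's defaults are never taken (exact)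
  ((PySem.List.pyRange 0 row 1).foldl
    (fun (d : PySem.Dict Int (Int × Int)) i =>
      (PySem.List.pyRange 0 col 1).foldl
        (fun d j => d.insert (PySem.List.pyGetD (PySem.List.pyGetD ret i []) j 0) (i, j)) d)
    (PySem.Dict.mk [])).items

-- ===== PORT B =====
def generate_reflection_alt (row : Int) (col : Int) : List (Int × Int × Int) :=
  ((PySem.List.pyRange 0 row 1).foldl
    (fun (d : PySem.Dict Int (Int × Int)) i =>
      let orig := row - 1 - i
      let base := orig * col + 1
      (PySem.List.pyRange 0 col 1).foldl
        (fun d j =>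
          let value := if PySem.Int.mod orig 2 = 0 then base + j else base + col - 1 - j
          d.insert value (i, j)) d)
    (PySem.Dict.mk [])).items

-- ===== PRECONDITION & SPEC =====
def Spec_generate_reflection (row : Int) (col : Int) (out : List (Int × Int × Int)) : Prop := out = generate_reflection_alt row col
instance (row : Int) (col : Int) (out : List (Int × Int × Int)) : Decidable (Spec_generate_reflection row col out) := by unfold Spec_generate_reflection; infer_instance

-- ===== CLAIM (what is proved, stated in full; the proofs are below) =====
def Claim_equal_generate_reflection : Prop := ∀ (row : Int) (col : Int), Dom_generate_reflection row col → Spec_generate_reflection row col (generate_reflection row col)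

-- ===== LEMMAS AND PROOFS =====

-- the row of the board A builds for original row-index k (ascending when k is even)
def pvRowA (col : Int) (k : Nat) : List Int :=
  if k % 2 = 0 then PySem.List.pyRange ((k : Int) * col + 1) ((k : Int) * col + 1 + col) 1
  else (PySem.List.pyRange ((k : Int) * col + 1) ((k : Int) * col + 1 + col) 1).reverse

-- A's building loop produces the rows pvRowA in reverse order, with the final flag = parity of n
lemma pvBuild_eq (col : Int) (n : Nat) :
    ((PySem.List.pyRange 0 (n : Int) 1).foldl (pvStepA col) ([], true))
      = (((List.range n).map (pvRowA col)).reverse, decide (n % 2 = 0)) := by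
  induction n with
  | zero => simp [PySem.List.pyRange_one_eq_nil]
  | succ n ih =>
    have hc : ((n + 1 : Nat) : Int) = (n : Int) + 1 := by push_cast; ring
    rw [hc, PySem.List.pyRange_one_succ_right (by positivity), List.foldl_append, ih,
      List.range_succ, List.map_append]
    simp only [List.map_cons, List.map_nil, List.foldl_cons, List.foldl_nil,
      List.reverse_append, List.reverse_cons, List.reverse_nil, List.nil_append,
      List.singleton_append]
    unfold pvStepA pvRowA
    simp only [PySem.List.insert_zero, PySem.List.slice?_none_none_neg_one, Option.getD_some]
    rcases Nat.even_or_odd n with h | h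
    · have h2 : n % 2 = 0 := Nat.even_iff.mp h
      have h3 : (n+1) % 2 = 1 := by omega
      simp [h2, h3]
    · have h2 : n % 2 = 1 := Nat.odd_iff.mp h
      have h3 : (n+1) % 2 = 0 := by omega
      simp [h2, h3]

-- indexing into one built row gives the closed-form value B computes
lemma pvRow_get (col : Int) (k : Nat) (j : Int) (hj0 : 0 ≤ j) (hj : j < col) :
    PySem.List.pyGetD (pvRowA col k) j 0
      = (if (k : Int) % 2 = 0 then (k : Int) * col + 1 + j else (k : Int) * col + 1 + col - 1 - j) := by
  have hlen : (PySem.List.pyRange ((k : Int) * col + 1) ((k : Int) * col + 1 + col) 1).length = col.toNat := by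
    rw [PySem.List.length_pyRange_one]; omega
  have hpar : ((k : Int) % 2 = 0) ↔ (k % 2 = 0) := by omega
  unfold pvRowA
  by_cases h : k % 2 = 0
  · rw [if_pos h, if_pos (hpar.mpr h)]
    rw [PySem.List.pyGetD_eq_getElem _ _ hj0 (by rw [hlen]; omega)]
    rw [PySem.List.getElem_pyRange_one]
    omega
  · rw [if_neg h, if_neg (fun hc => h (hpar.mp hc))]
    rw [PySem.List.pyGetD_eq_getElem _ _ hj0 (by simp [List.length_reverse, hlen]; omega)]
    rw [List.getElem_reverse]
    rw [PySem.List.getElem_pyRange_one]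
    simp only [hlen]
    omega

-- A's lookup ret[i][j] equals B's closed-form key
lemma pv_key_eq (row col i j : Int) (hi0 : 0 ≤ i) (hi : i < row) (hj0 : 0 ≤ j) (hj : j < col) :
    PySem.List.pyGetD
      (PySem.List.pyGetD (((PySem.List.pyRange 0 row 1).foldl (pvStepA col) ([], true)).1) i []) j 0
      = (if PySem.Int.mod (row - 1 - i) 2 = 0 then (row - 1 - i) * col + 1 + j
         else (row - 1 - i) * col + 1 + col - 1 - j) := by
  lift row to ℕ using (by omega) with n
  rw [pvBuild_eq]
  have hlen : (((List.range n).map (pvRowA col)).reverse).length = n := by simp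
  have hin : i.toNat < n := by omega
  rw [PySem.List.pyGetD_eq_getElem _ _ hi0 (by rw [hlen]; omega)]
  rw [List.getElem_reverse, List.getElem_map, List.getElem_range]
  simp only [List.length_map, List.length_range]
  have hk : ((n - 1 - i.toNat : Nat) : Int) = (n : Int) - 1 - i := by omega
  rw [pvRow_get col _ j hj0 hj, hk]
  have hm : PySem.Int.mod ((n : Int) - 1 - i) 2 = ((n : Int) - 1 - i) % 2 := by
    simp [PySem.Int.mod, Int.fmod_eq_emod_of_nonneg _ (by norm_num : (0:Int) ≤ 2)]
  rw [hm]

-- ===== VERDICT (by name: the statement is the Claim_ definition above) =====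
theorem generate_reflection_spec : Claim_equal_generate_reflection := by
  intro row col _
  unfold Spec_generate_reflection generate_reflection generate_reflection_alt
  simp only []
  congr 1
  apply PySem.List.foldl_congr_mem
  intro acc i hi
  obtain ⟨hi0, hilt⟩ := (PySem.List.mem_pyRange_one).mp hi
  apply PySem.List.foldl_congr_mem
  intro d j hj
  obtain ⟨hj0, hjlt⟩ := (PySem.List.mem_pyRange_one).mp hj
  rw [pv_key_eq row col i j hi0 hilt hj0 hjlt]
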